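-- pv_equiv track=rewrite | github.com/husnainakram09/advent-of-code | 2025/Day_1_Problem_2.py | count_all_clicks
-- ===== SOURCE A (Python) =====
-- def count_all_clicks(lines):
--     pos = 50
--     total = 0
--     for raw in lines:
--         s = raw.strip()
--         if not s:
--             continue
--         dirc = s[0].upper()
--         d = int(s[1:])
--         p = pos
--         if dirc == 'R':
--             k0 = (100 - p) % 100
--         else:
--             k0 = p % 100
--
--         if k0 == 0:
--             k0 = 100
--
--         if k0 <= d:
--             hits = 1 + (d - k0) // 100
--             total += hits
--
--         if dirc == 'R':
--             pos = (pos + d) % 100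
--         else:
--             pos = (pos - d) % 100
--
--     return total
-- ===== SOURCE B (Python) =====
-- def count_all_clicks(lines):
--     # Staged pipeline instead of a single stateful loop:
--     # 1) parse lines into (is_right, distance) moves,
--     # 2) build the list of absolute (non-wrapping) positions visited,
--     # 3) per segment, count crossed multiples of 100 by floor/ceil division and sum.
--     moves = []
--     for raw in lines:
--         s = raw.strip()
--         if s:
--             moves.append((s[0].upper() == 'R', int(s[1:])))
--     positions = [50]
--     for is_r, d in moves:
--         positions.append(positions[-1] + (d if is_r else -d))
--     total = 0
--     for (is_r, d), (a, b) in zip(moves, zip(positions, positions[1:])):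
--         if d > 0:
--             total += (b // 100 - a // 100) if is_r else (-((-a) // 100)) - (-((-b) // 100))
--     return total
-- ===== Notes on version B (the rewrite author's own statement) =====
-- stated objective: alternative
-- what changed: B replaces A's single stateful loop (mod-100 position, distance-to-next-boundary k0 arithmetic) by a three-stage pipeline: parse all moves, build the full absolute non-wrapping position trajectory as a list, then sum over adjacent position pairs the multiples of 100 each segment crosses via floor/ceil division.
import Mathlib
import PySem

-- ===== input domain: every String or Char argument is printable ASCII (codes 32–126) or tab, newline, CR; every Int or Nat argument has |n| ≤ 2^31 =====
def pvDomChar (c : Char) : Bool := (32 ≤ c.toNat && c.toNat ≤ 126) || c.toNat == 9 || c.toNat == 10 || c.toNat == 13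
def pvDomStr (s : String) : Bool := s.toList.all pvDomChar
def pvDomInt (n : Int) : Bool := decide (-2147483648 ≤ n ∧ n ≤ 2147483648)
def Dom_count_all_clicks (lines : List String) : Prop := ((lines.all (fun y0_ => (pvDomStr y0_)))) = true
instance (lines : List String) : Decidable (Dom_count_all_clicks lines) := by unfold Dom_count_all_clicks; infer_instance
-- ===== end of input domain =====

-- B replaces A's single stateful mod-100 loop by a staged pipeline (parse moves, build the
-- absolute position trajectory, sum crossed multiples of 100 per segment): an alternative
-- decomposition of the same task, proved to return the same total.

-- ===== PORT A =====
-- one loop iteration of A; state = (pos, total)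
def pvStepA (st : Int × Int) (raw : String) : Int × Int :=
  let s := (PySem.Str.strip raw).toList
  match s with
  | [] => st                                   -- 'if not s: continue'
  | c :: rest =>
    let dirc := PySem.Chars.upperChar c        -- s[0].upper()
    let d := (PySem.Int.ofChars? rest).getD 0  -- int(s[1:]); none excluded by Pre_
    let p := st.1
    let k0 := if dirc = 'R' then PySem.Int.mod (100 - p) 100 else PySem.Int.mod p 100
    let k0 := if k0 = 0 then 100 else k0
    let total := if k0 ≤ d then st.2 + (1 + PySem.Int.floordiv (d - k0) 100) else st.2
    let pos := if dirc = 'R' then PySem.Int.mod (st.1 + d) 100 else PySem.Int.mod (st.1 - d) 100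
    (pos, total)

def count_all_clicks (lines : List String) : Int :=
  (lines.foldl pvStepA (50, 0)).2

-- ===== PORT B =====
-- stage 1: parse a line into (is_right, distance); none = blank line (skipped)
def pvParseLine (raw : String) : Option (Bool × Int) :=
  match (PySem.Str.strip raw).toList with
  | [] => none
  | c :: rest => some (PySem.Chars.upperChar c = 'R', (PySem.Int.ofChars? rest).getD 0)

def pvMoves (lines : List String) : List (Bool × Int) :=
  lines.filterMap pvParseLine

-- stage 2: the absolute (non-wrapping) positions visited, starting at p
def pvPositions (p : Int) : List (Bool × Int) → List Int
  | [] => [p]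
  | (r, d) :: ms => p :: pvPositions (if r then p + d else p - d) ms

-- stage 3: one summand — multiples of 100 crossed moving from a to b (0 for d ≤ 0)
def pvStep3 (total : Int) (x : (Bool × Int) × Int × Int) : Int :=
  if 0 < x.1.2 then
    total + (if x.1.1 then PySem.Int.floordiv x.2.2 100 - PySem.Int.floordiv x.2.1 100
             else (-(PySem.Int.floordiv (-x.2.1) 100)) - (-(PySem.Int.floordiv (-x.2.2) 100)))
  else total

def count_all_clicks_alt (lines : List String) : Int :=
  let moves := pvMoves lines
  let positions := pvPositions 50 moves
  (moves.zip (positions.zip positions.tail)).foldl pvStep3 0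

-- ===== PRECONDITION & SPEC =====
-- Pre_ excludes exactly the inputs on which Python A raises ValueError: a non-blank line whose
-- tail (after the direction character) is not a valid int literal. (Both Pythons raise there.)
def Pre_count_all_clicks (lines : List String) : Prop :=
  ∀ raw ∈ lines,
    (PySem.Str.strip raw).toList = [] ∨
    (PySem.Int.ofChars? ((PySem.Str.strip raw).toList.tail)).isSome = true
instance (lines : List String) : Decidable (Pre_count_all_clicks lines) := by
  unfold Pre_count_all_clicks; infer_instance

def pvWitness_count_all_clicks : List String := ["R150", " l275 ", "", "x30"]

def Spec_count_all_clicks (lines : List String) (out : Int) : Prop := out = count_all_clicks_alt lines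
instance (lines : List String) (out : Int) : Decidable (Spec_count_all_clicks lines out) := by
  unfold Spec_count_all_clicks; infer_instance

-- ===== CLAIM (what is proved, stated in full; the proofs are below) =====
def Claim_equal_count_all_clicks : Prop := ∀ (lines : List String), Dom_count_all_clicks lines → Pre_count_all_clicks lines → Spec_count_all_clicks lines (count_all_clicks lines)

-- ===== LEMMAS AND PROOFS =====

-- compressed form of B's stages 2+3: the click total of the moves starting at absolute position p
def pvSum (p : Int) : List (Bool × Int) → Int
  | [] => 0
  | (r, d) :: ms =>
    let q := if r then p + d else p - d
    (if 0 < d then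
       (if r then PySem.Int.floordiv q 100 - PySem.Int.floordiv p 100
        else (-(PySem.Int.floordiv (-p) 100)) - (-(PySem.Int.floordiv (-q) 100)))
     else 0) + pvSum q ms

theorem pvPositions_ex (ms : List (Bool × Int)) (p : Int) :
    ∃ t, pvPositions p ms = p :: t := by
  cases ms with
  | nil => exact ⟨[], rfl⟩
  | cons m ms =>
    obtain ⟨r, d⟩ := m
    exact ⟨pvPositions (if r then p + d else p - d) ms, rfl⟩

theorem pvZip_eq_pvSum (ms : List (Bool × Int)) (p t : Int) :
    ((ms.zip ((pvPositions p ms).zip (pvPositions p ms).tail)).foldl pvStep3 t)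
      = t + pvSum p ms := by
  induction ms generalizing p t with
  | nil => simp [pvPositions, pvSum]
  | cons m ms ih =>
    obtain ⟨r, d⟩ := m
    obtain ⟨tl, htl⟩ := pvPositions_ex ms (if r then p + d else p - d)
    have ih' : ∀ t' : Int,
        List.foldl pvStep3 t' (ms.zip (((if r then p + d else p - d) :: tl).zip tl))
          = t' + pvSum (if r then p + d else p - d) ms := by
      intro t'
      have h := ih (if r then p + d else p - d) t'
      rwa [htl, List.tail_cons] at h
    simp only [pvPositions, htl, List.tail_cons, List.zip_cons_cons, List.foldl_cons]
    rw [ih']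
    have hstep : pvStep3 t ((r, d), p, if r then p + d else p - d)
        = t + (if 0 < d then
            (if r then PySem.Int.floordiv (if r then p + d else p - d) 100 - PySem.Int.floordiv p 100
             else (-(PySem.Int.floordiv (-p) 100)) - (-(PySem.Int.floordiv (-(if r then p + d else p - d)) 100)))
          else 0) := by
      simp only [pvStep3]; split_ifs <;> ring
    rw [hstep]
    simp only [pvSum]
    ring

theorem pvAlt_eq_pvSum (lines : List String) :
    count_all_clicks_alt lines = pvSum 50 (pvMoves lines) := by
  unfold count_all_clicks_alt
  simpa using pvZip_eq_pvSum (pvMoves lines) 50 0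

theorem pvA_fold (lines : List String) (p t : Int) :
    (lines.foldl pvStepA (PySem.Int.mod p 100, t)).2 = t + pvSum p (pvMoves lines) := by
  induction lines generalizing p t with
  | nil => simp [pvMoves, pvSum]
  | cons raw rest ih =>
    have hm : ∀ x : Int, PySem.Int.mod x 100 = x % 100 :=
      fun x => PySem.Int.mod_eq_emod_of_pos (by norm_num)
    have hf : ∀ x : Int, PySem.Int.floordiv x 100 = x / 100 :=
      fun x => PySem.Int.floordiv_eq_ediv_of_pos (by norm_num)
    cases hs : PySem.Chars.strip raw.toList with
    | nil =>
      have hskip : pvStepA (PySem.Int.mod p 100, t) raw = (PySem.Int.mod p 100, t) := by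
        unfold pvStepA; simp [hs]
      have hmv : pvMoves (raw :: rest) = pvMoves rest := by
        simp [pvMoves, pvParseLine, hs]
      simp only [List.foldl_cons, hskip, hmv, ih]
    | cons c cs =>
      by_cases hrc : PySem.Chars.upperChar c = 'R'
      · have hmv : pvMoves (raw :: rest) = (true, (PySem.Int.ofChars? cs).getD 0) :: pvMoves rest := by
          simp [pvMoves, pvParseLine, hs, hrc]
        have hterm : pvStepA (PySem.Int.mod p 100, t) raw
            = (PySem.Int.mod (p + (PySem.Int.ofChars? cs).getD 0) 100,
               t + (if 0 < (PySem.Int.ofChars? cs).getD 0 then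
                  PySem.Int.floordiv (p + (PySem.Int.ofChars? cs).getD 0) 100 - PySem.Int.floordiv p 100
                else 0)) := by
          unfold pvStepA
          simp only [PySem.Str.toList_strip, hs]
          simp only [if_pos hrc]
          simp only [Prod.mk.injEq, hm, hf]
          refine ⟨by omega, ?_⟩
          split_ifs <;> omega
        rw [List.foldl_cons, hterm, ih (p + (PySem.Int.ofChars? cs).getD 0), hmv]
        simp [pvSum]
        ring
      · have hmv : pvMoves (raw :: rest) = (false, (PySem.Int.ofChars? cs).getD 0) :: pvMoves rest := by
          simp [pvMoves, pvParseLine, hs, hrc]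
        have hterm : pvStepA (PySem.Int.mod p 100, t) raw
            = (PySem.Int.mod (p - (PySem.Int.ofChars? cs).getD 0) 100,
               t + (if 0 < (PySem.Int.ofChars? cs).getD 0 then
                  (-(PySem.Int.floordiv (-p) 100)) - (-(PySem.Int.floordiv (-(p - (PySem.Int.ofChars? cs).getD 0)) 100))
                else 0)) := by
          unfold pvStepA
          simp only [PySem.Str.toList_strip, hs]
          simp only [if_neg hrc]
          simp only [Prod.mk.injEq, hm, hf]
          refine ⟨by omega, ?_⟩
          split_ifs <;> omega
        rw [List.foldl_cons, hterm, ih (p - (PySem.Int.ofChars? cs).getD 0), hmv]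
        simp [pvSum]
        ring

-- ===== VERDICT (by name: the statement is the Claim_ definition above) =====
theorem count_all_clicks_spec : Claim_equal_count_all_clicks := by
  intro lines _ _
  unfold Spec_count_all_clicks count_all_clicks
  rw [pvAlt_eq_pvSum]
  calc (lines.foldl pvStepA (50, 0)).2
      = (lines.foldl pvStepA (PySem.Int.mod 50 100, 0)).2 := by
        rw [show PySem.Int.mod 50 100 = (50 : Int) from by decide]
    _ = 0 + pvSum 50 (pvMoves lines) := pvA_fold lines 50 0
    _ = pvSum 50 (pvMoves lines) := by ring
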